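-- pv_equiv track=rewrite | github.com/gruhflust/risng | code/ansible/runtime/qperf/files/cheaplantest_report_eantc.py | _group_results_by_test
-- ===== SOURCE A (Python) =====
-- from typing import Sequence
--
-- def _group_results_by_test(results: Sequence[dict]) -> list[tuple[str, list[dict]]]:
--     grouped: dict[str, list[dict]] = {}
--     for entry in results:
--         test_name = str(entry.get("test", "unknown"))
--         grouped.setdefault(test_name, []).append(entry)
--     grouped_items: list[tuple[str, list[dict]]] = []
--     for test_name in sorted(grouped):
--         entries = sorted(
--             grouped[test_name],
--             key=lambda item: (str(item.get("target", "")), str(item.get("address", ""))),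
--         )
--         grouped_items.append((test_name, entries))
--     return grouped_items
-- ===== SOURCE B (Python) =====
-- from typing import Sequence
--
--
-- def _group_results_by_test(results: Sequence[dict]) -> list[tuple[str, list[dict]]]:
--     # One global stable sort (minor keys first, then the grouping key), then a
--     # single linear pass that opens a new group whenever the test name changes.
--     ordered = sorted(results, key=lambda e: (str(e.get("target", "")), str(e.get("address", ""))))
--     ordered = sorted(ordered, key=lambda e: str(e.get("test", "unknown")))
--     groups: list[tuple[str, list[dict]]] = []
--     for entry in ordered:
--         name = str(entry.get("test", "unknown"))
--         if groups and groups[-1][0] == name: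
--             groups[-1][1].append(entry)
--         else:
--             groups.append((name, [entry]))
--     return groups
-- ===== Notes on version B (the rewrite author's own statement) =====
-- stated objective: alternative
-- what changed: B replaces A's dict bucketing plus per-group sorting by a globally stable two-pass sort of the whole list (minor keys target/address first, then the test name) followed by one linear pass that groups consecutive entries with equal test name.
import Mathlib
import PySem

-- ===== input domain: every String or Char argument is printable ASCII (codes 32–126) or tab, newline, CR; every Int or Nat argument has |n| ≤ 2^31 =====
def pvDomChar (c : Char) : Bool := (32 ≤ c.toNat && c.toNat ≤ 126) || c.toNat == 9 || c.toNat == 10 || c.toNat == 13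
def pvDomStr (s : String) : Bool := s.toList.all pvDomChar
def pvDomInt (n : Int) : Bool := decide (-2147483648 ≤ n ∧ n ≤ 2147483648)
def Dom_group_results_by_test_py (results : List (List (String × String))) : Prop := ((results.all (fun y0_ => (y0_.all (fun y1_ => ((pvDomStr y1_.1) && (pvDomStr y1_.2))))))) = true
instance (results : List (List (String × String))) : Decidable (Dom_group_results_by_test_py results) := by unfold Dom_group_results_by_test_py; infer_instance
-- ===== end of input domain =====

-- B replaces A's dict bucketing + per-bucket sorts by one globally stable two-pass sort
-- (minor keys target/address first, then the test name) followed by a single linear pass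
-- that opens a new group whenever the test name changes (objective: alternative).

-- dict.get(k, dflt) on an association list (first match, Python dict semantics)
def pvGetKey (entry : List (String × String)) (k : String) (dflt : String) : String :=
  match entry.find? (fun p => p.1 == k) with
  | some p => p.2
  | none => dflt

-- ===== PORT A =====
def group_results_by_test_py (results : List (List (String × String))) : List (String × (List (List (String × String)))) :=
  -- grouped.setdefault(test_name, []).append(entry)  ==  grouped[test_name] = grouped.get(test_name, []) + [entry]
  let grouped : PySem.Dict String (List (List (String × String))) :=
    results.foldl (fun d entry => d.modify (pvGetKey entry "test" "unknown") [] (fun v => v ++ [entry])) PySem.Dict.empty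
  (PySem.List.sorted grouped.keys (fun x => x) false).foldl
    (fun acc test_name =>
      acc ++ [(test_name,
        PySem.List.sorted2 (grouped.getD test_name [])
          (fun item => pvGetKey item "target" "") (fun item => pvGetKey item "address" "") false)]) []

-- ===== PORT B =====
-- the body of B's for-loop: append to the last group if the name matches, else open a new group
def pvStep (groups : List (String × List (List (String × String)))) (entry : List (String × String)) :
    List (String × List (List (String × String))) :=
  let name := pvGetKey entry "test" "unknown"
  match groups.getLast? with
  | none => [(name, [entry])]
  | some last =>
    if last.1 == name then groups.dropLast ++ [(last.1, last.2 ++ [entry])]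
    else groups ++ [(name, [entry])]

def group_results_by_test_py_alt (results : List (List (String × String))) : List (String × (List (List (String × String)))) :=
  let ordered1 := PySem.List.sorted2 results
    (fun e => pvGetKey e "target" "") (fun e => pvGetKey e "address" "") false
  let ordered := PySem.List.sorted ordered1 (fun e => pvGetKey e "test" "unknown") false
  ordered.foldl pvStep []

-- ===== PRECONDITION & SPEC =====
def Spec_group_results_by_test_py (results : List (List (String × String))) (out : List (String × (List (List (String × String))))) : Prop := out = group_results_by_test_py_alt results
instance (results : List (List (String × String))) (out : List (String × (List (List (String × String))))) : Decidable (Spec_group_results_by_test_py results out) := by unfold Spec_group_results_by_test_py; infer_instance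

-- ===== CLAIM (what is proved, stated in full; the proofs are below) =====
def Claim_equal_group_results_by_test_py : Prop := ∀ (results : List (List (String × String))), Dom_group_results_by_test_py results → Spec_group_results_by_test_py results (group_results_by_test_py results)

-- ===== LEMMAS AND PROOFS =====

-- the test name of an entry (proof-side abbreviation)
def pvName (e : List (String × String)) : String := pvGetKey e "test" "unknown"
def pvTar (e : List (String × String)) : String := pvGetKey e "target" ""
def pvAdr (e : List (String × String)) : String := pvGetKey e "address" ""

-- ---- generic facts about insertBy with a key comparator ----

theorem pv_insertBy_all {α κ : Type} [LinearOrder κ] (K : α → κ) (x : α) (l : List α)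
    (h : ∀ z ∈ l, K x < K z) :
    PySem.List.insertBy (fun a b => decide (K a < K b)) x l = x :: l := by
  cases l with
  | nil => rfl
  | cons y ys => simp [PySem.List.insertBy, h y (List.mem_cons_self)]

theorem pv_insertBy_skip {α κ : Type} [LinearOrder κ] (K : α → κ) (x : α) (l1 l2 : List α)
    (h : ∀ y ∈ l1, ¬ K x < K y) :
    PySem.List.insertBy (fun a b => decide (K a < K b)) x (l1 ++ l2)
      = l1 ++ PySem.List.insertBy (fun a b => decide (K a < K b)) x l2 := by
  induction l1 with
  | nil => rfl
  | cons y ys ih =>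
    simp only [List.cons_append]
    have hy : ¬ K x < K y := h y (List.mem_cons_self)
    simp only [PySem.List.insertBy, decide_eq_true_eq, if_neg hy]
    exact congrArg _ (ih (fun z hz => h z (List.mem_cons_of_mem _ hz)))

theorem pv_filter_insertBy {α κ : Type} [LinearOrder κ] (K : α → κ) (p : α → Bool) (x : α)
    (l : List α) (h : l.Pairwise (fun a b => K a ≤ K b)) :
    (PySem.List.insertBy (fun a b => decide (K a < K b)) x l).filter p
      = if p x then PySem.List.insertBy (fun a b => decide (K a < K b)) x (l.filter p)
        else l.filter p := by
  induction l with
  | nil => cases hp : p x <;> simp [PySem.List.insertBy, hp]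
  | cons y ys ih =>
    rcases List.pairwise_cons.mp h with ⟨hy, hys⟩
    by_cases hxy : K x < K y
    · have h1 : ∀ z ∈ (y :: ys).filter p, K x < K z := by
        intro z hz
        rcases List.mem_cons.mp (List.mem_of_mem_filter hz) with rfl | hz'
        · exact hxy
        · exact lt_of_lt_of_le hxy (hy z hz')
      cases hp : p x
      · simp [PySem.List.insertBy, hxy, hp]
      · simp [PySem.List.insertBy, hxy, hp, pv_insertBy_all K x _ h1]
    · have e1 : PySem.List.insertBy (fun a b => decide (K a < K b)) x (y :: ys)
          = y :: PySem.List.insertBy (fun a b => decide (K a < K b)) x ys := by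
        simp [PySem.List.insertBy, hxy]
      rw [e1]
      cases hpy : p y
      · simp only [List.filter_cons, hpy]
        simpa [List.filter_cons, hpy] using ih hys
      · cases hp : p x
        · simp [hpy, hp, ih hys]
        · simp only [List.filter_cons, hpy, if_true]
          rw [ih hys]
          simp only [hp, if_true]
          simp [PySem.List.insertBy, hxy]

theorem pv_sorted_concat {α κ : Type} [LinearOrder κ] (K : α → κ) (xs : List α) (x : α) :
    PySem.List.sorted (xs ++ [x]) K false
      = PySem.List.insertBy (fun a b => decide (K a < K b)) x (PySem.List.sorted xs K false) := by
  rw [PySem.List.sorted_eq_foldl_insertBy, PySem.List.sorted_eq_foldl_insertBy, List.foldl_append]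
  rfl

-- filter commutes with the stable sort
theorem pv_sorted_filter {α κ : Type} [LinearOrder κ] (K : α → κ) (p : α → Bool) (xs : List α) :
    (PySem.List.sorted xs K false).filter p = PySem.List.sorted (xs.filter p) K false := by
  induction xs using List.reverseRecOn with
  | nil => rfl
  | append_singleton xs x ih =>
    rw [pv_sorted_concat, pv_filter_insertBy K p x _ (PySem.List.sorted_pairwise xs K), ih]
    cases hp : p x <;> simp [hp, List.filter_append, pv_sorted_concat]

-- ---- sorted2 is sorted with the lexicographic key ----

theorem pv_lex_before {κ₁ κ₂ : Type} [LinearOrder κ₁] [LinearOrder κ₂] (A B : κ₁) (a b : κ₂) :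
    (decide (A < B) || (!decide (B < A) && decide (a < b)))
      = decide (toLex (A, a) < toLex (B, b)) := by
  rcases lt_trichotomy A B with h | rfl | h
  · simp [h, asymm h, Prod.Lex.lt_iff]
  · simp [Prod.Lex.lt_iff]
  · have h1 : ¬ A < B := not_lt_of_gt h
    have h2 : A ≠ B := ne_of_gt h
    simp [h1, h, h2, Prod.Lex.lt_iff]

theorem pv_sorted2_eq {α κ₁ κ₂ : Type} [LinearOrder κ₁] [LinearOrder κ₂]
    (xs : List α) (k1 : α → κ₁) (k2 : α → κ₂) :
    PySem.List.sorted2 xs k1 k2 false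
      = PySem.List.sorted xs (fun e => toLex (k1 e, k2 e)) false := by
  have hcmp : (fun (a b : α) => (decide (k1 a < k1 b) || (!decide (k1 b < k1 a) && decide (k2 a < k2 b))))
      = fun a b => decide ((fun e => toLex (k1 e, k2 e)) a < (fun e => toLex (k1 e, k2 e)) b) := by
    funext a b
    exact pv_lex_before (k1 a) (k1 b) (k2 a) (k2 b)
  show List.foldl (fun acc x => PySem.List.insertBy
      (fun a b => (decide (k1 a < k1 b) || (!decide (k1 b < k1 a) && decide (k2 a < k2 b)))) x acc) [] xs = _
  rw [hcmp, ← PySem.List.sorted_eq_foldl_insertBy]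

-- ---- sorting by name = concatenation of the name blocks in sorted name order ----

theorem pv_flatMap_congr {α β : Type} (l : List α) (f g : α → List β)
    (h : ∀ a ∈ l, f a = g a) : l.flatMap f = l.flatMap g := by
  rw [List.flatMap_def, List.flatMap_def, List.map_congr_left h]

theorem pv_ofList_concat {α : Type} [BEq α] (l : List α) (a : α) :
    PySem.Set.ofList (l ++ [a]) = PySem.Set.add (PySem.Set.ofList l) a := by
  rw [PySem.Set.ofList_eq_foldl, PySem.Set.ofList_eq_foldl, List.foldl_append]
  rfl

-- inserting an entry whose name is already present appends it at the end of its block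
theorem pv_insertBy_flatMap_mem (ns : List String) (B : String → List (List (String × String)))
    (x : List (String × String)) (hs : ns.Pairwise (· < ·))
    (hB : ∀ n ∈ ns, ∀ e ∈ B n, pvName e = n) (hx : pvName x ∈ ns) :
    PySem.List.insertBy (fun a b => decide (pvName a < pvName b)) x (ns.flatMap B)
      = ns.flatMap (fun n => B n ++ if pvName x == n then [x] else []) := by
  induction ns with
  | nil => cases hx
  | cons n rest ih =>
    rcases List.pairwise_cons.mp hs with ⟨hn, hrest⟩
    simp only [List.flatMap_cons]
    by_cases hEq : pvName x = n
    · have h1 : ∀ y ∈ B n, ¬ pvName x < pvName y := by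
        intro y hy
        rw [hB n List.mem_cons_self y hy, hEq]
        exact lt_irrefl n
      rw [pv_insertBy_skip pvName x (B n) _ h1]
      have h2 : ∀ z ∈ rest.flatMap B, pvName x < pvName z := by
        intro z hz
        rcases List.mem_flatMap.mp hz with ⟨m, hm, hzm⟩
        rw [hB m (List.mem_cons_of_mem _ hm) z hzm, hEq]
        exact hn m hm
      rw [pv_insertBy_all pvName x _ h2]
      have h3 : rest.flatMap (fun m => B m ++ if pvName x == m then [x] else [])
          = rest.flatMap B := by
        apply pv_flatMap_congr
        intro m hm
        have : pvName x ≠ m := by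
          rw [hEq]
          exact ne_of_lt (hn m hm)
        simp [this]
      rw [h3]
      simp [hEq]
    · have hx' : pvName x ∈ rest := by
        rcases List.mem_cons.mp hx with h | h
        · exact absurd h hEq
        · exact h
      have h1 : ∀ y ∈ B n, ¬ pvName x < pvName y := by
        intro y hy
        rw [hB n List.mem_cons_self y hy]
        exact not_lt_of_gt (hn _ hx')
      rw [pv_insertBy_skip pvName x (B n) _ h1,
        ih hrest (fun m hm => hB m (List.mem_cons_of_mem _ hm)) hx']
      have : (pvName x == n) = false := by simp [hEq]
      simp [this]

-- inserting an entry with a new name creates its own block at the sorted position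
theorem pv_insertBy_flatMap_not_mem (ns : List String) (B : String → List (List (String × String)))
    (x : List (String × String)) (hs : ns.Pairwise (· < ·))
    (hB : ∀ n ∈ ns, ∀ e ∈ B n, pvName e = n) (hx : pvName x ∉ ns)
    (hB0 : B (pvName x) = []) :
    PySem.List.insertBy (fun a b => decide (pvName a < pvName b)) x (ns.flatMap B)
      = (PySem.List.insertBy (fun a b => decide (a < b)) (pvName x) ns).flatMap
          (fun n => B n ++ if pvName x == n then [x] else []) := by
  induction ns with
  | nil =>
    simp [PySem.List.insertBy, hB0]
  | cons n rest ih =>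
    rcases List.pairwise_cons.mp hs with ⟨hn, hrest⟩
    have hne : pvName x ≠ n := fun h => hx (h ▸ List.mem_cons_self)
    rcases lt_trichotomy (pvName x) n with hlt | hEq | hgt
    · have h2 : ∀ z ∈ (n :: rest).flatMap B, pvName x < pvName z := by
        intro z hz
        rcases List.mem_flatMap.mp hz with ⟨m, hm, hzm⟩
        rw [hB m hm z hzm]
        rcases List.mem_cons.mp hm with rfl | hm'
        · exact hlt
        · exact lt_trans hlt (hn m hm')
      rw [pv_insertBy_all (fun s => s) (pvName x) (n :: rest) ?h2']
      case h2' =>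
        intro z hz
        rcases List.mem_cons.mp hz with rfl | hz'
        · exact hlt
        · exact lt_trans hlt (hn z hz')
      · rw [pv_insertBy_all pvName x _ h2]
        have h3 : rest.flatMap (fun m => B m ++ if pvName x = m then [x] else [])
            = rest.flatMap B := by
          apply pv_flatMap_congr
          intro m hm
          have : pvName x ≠ m := ne_of_lt (lt_trans hlt (hn m hm))
          simp [this]
        simp [List.flatMap_cons, hB0, hne, h3]
    · exact absurd hEq hne
    · have h1 : ∀ y ∈ B n, ¬ pvName x < pvName y := by
        intro y hy
        rw [hB n List.mem_cons_self y hy]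
        exact not_lt_of_gt hgt
      have e1 : PySem.List.insertBy (fun a b : String => decide (a < b)) (pvName x) (n :: rest)
          = n :: PySem.List.insertBy (fun a b : String => decide (a < b)) (pvName x) rest := by
        simp [PySem.List.insertBy, not_lt_of_gt hgt]
      simp only [List.flatMap_cons]
      rw [pv_insertBy_skip pvName x (B n) _ h1, e1]
      simp only [List.flatMap_cons]
      rw [ih hrest (fun m hm => hB m (List.mem_cons_of_mem _ hm))
        (fun h => hx (List.mem_cons_of_mem _ h))]
      have : (pvName x == n) = false := by simp [hne]
      simp [this]

-- the stable sort by test name is the concatenation of the per-name filters,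
-- names in sorted order
theorem pv_sorted_name_flatten (xs : List (List (String × String))) :
    PySem.List.sorted xs pvName false
      = (PySem.List.sorted (PySem.Set.ofList (xs.map pvName)) (fun x => x) false).flatMap
          (fun n => xs.filter (fun e => pvName e == n)) := by
  induction xs using List.reverseRecOn with
  | nil => rfl
  | append_singleton xs x ih =>
    have hs : (PySem.List.sorted (PySem.Set.ofList (xs.map pvName)) (fun x => x) false).Pairwise (· < ·) :=
      PySem.List.sorted_ofList_pairwise_lt _
    have hB : ∀ n ∈ PySem.List.sorted (PySem.Set.ofList (xs.map pvName)) (fun x => x) false,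
        ∀ e ∈ xs.filter (fun e => pvName e == n), pvName e = n := by
      intro n _ e he
      exact eq_of_beq ((List.mem_filter.mp he).2)
    rw [pv_sorted_concat, ih]
    by_cases hmem : pvName x ∈ xs.map pvName
    · -- known name: the set (hence the sorted name list) is unchanged
      have hset : PySem.Set.ofList ((xs ++ [x]).map pvName) = PySem.Set.ofList (xs.map pvName) := by
        rw [List.map_append]
        simp only [List.map_cons, List.map_nil]
        rw [pv_ofList_concat]
        unfold PySem.Set.add
        rw [if_pos]
        simp only [PySem.Set.contains, List.contains_eq_mem, decide_eq_true_eq]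
        exact (PySem.Set.mem_ofList _ _).mpr hmem
      have hx : pvName x ∈ PySem.List.sorted (PySem.Set.ofList (xs.map pvName)) (fun x => x) false :=
        (PySem.List.mem_sorted _ _ _ _).mpr ((PySem.Set.mem_ofList _ _).mpr hmem)
      rw [pv_insertBy_flatMap_mem _ _ x hs hB hx, hset]
      apply pv_flatMap_congr
      intro n _
      rw [List.filter_append]
      simp [List.filter_cons]
    · -- new name: it is inserted into the sorted name list and forms the block [x]
      have hxs : pvName x ∉ PySem.List.sorted (PySem.Set.ofList (xs.map pvName)) (fun x => x) false := by
        intro h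
        exact hmem ((PySem.Set.mem_ofList _ _).mp ((PySem.List.mem_sorted _ _ _ _).mp h))
      have hB0 : xs.filter (fun e => pvName e == pvName x) = [] := by
        rw [List.filter_eq_nil_iff]
        intro e he hbe
        exact hmem (List.mem_map.mpr ⟨e, he, eq_of_beq hbe⟩)
      rw [pv_insertBy_flatMap_not_mem _ _ x hs hB hxs hB0]
      have hset : PySem.Set.ofList ((xs ++ [x]).map pvName)
          = PySem.Set.ofList (xs.map pvName) ++ [pvName x] := by
        rw [List.map_append]
        simp only [List.map_cons, List.map_nil]
        rw [pv_ofList_concat]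
        unfold PySem.Set.add
        rw [if_neg]
        simp only [PySem.Set.contains, List.contains_eq_mem, decide_eq_true_eq]
        intro h
        exact hmem ((PySem.Set.mem_ofList _ _).mp h)
      have hnames : PySem.List.sorted (PySem.Set.ofList ((xs ++ [x]).map pvName)) (fun x => x) false
          = PySem.List.insertBy (fun a b : String => decide (a < b)) (pvName x)
              (PySem.List.sorted (PySem.Set.ofList (xs.map pvName)) (fun x => x) false) := by
        rw [hset]
        exact pv_sorted_concat (fun x => x) _ _
      rw [hnames]
      apply pv_flatMap_congr
      intro n _
      rw [List.filter_append]
      simp [List.filter_cons]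

-- ---- the grouping pass ----

-- running a run of equal-named entries extends the last group
theorem pv_fold_run (n : String) (es : List (List (String × String)))
    (hn : ∀ e ∈ es, pvName e = n) :
    ∀ (acc : List (String × List (List (String × String)))) (g : List (List (String × String))),
      es.foldl pvStep (acc ++ [(n, g)]) = acc ++ [(n, g ++ es)] := by
  induction es with
  | nil => intro acc g; simp
  | cons e es ih =>
    intro acc g
    have hname : pvGetKey e "test" "unknown" = n := hn e List.mem_cons_self
    have h1 : pvStep (acc ++ [(n, g)]) e = acc ++ [(n, g ++ [e])] := by
      simp [pvStep, hname]
    rw [List.foldl_cons, h1, ih (fun e' he' => hn e' (List.mem_cons_of_mem _ he')) acc (g ++ [e])]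
    simp

-- folding one nonempty block of equal-named entries appends one group
theorem pv_fold_block (n : String) (e : List (String × String)) (es : List (List (String × String)))
    (hn : ∀ e' ∈ e :: es, pvName e' = n)
    (acc : List (String × List (List (String × String))))
    (hacc : ∀ q, acc.getLast? = some q → q.1 ≠ n) :
    (e :: es).foldl pvStep acc = acc ++ [(n, e :: es)] := by
  have hname : pvGetKey e "test" "unknown" = n := hn e List.mem_cons_self
  have h1 : pvStep acc e = acc ++ [(n, [e])] := by
    cases hl : acc.getLast? with
    | none =>
      have : acc = [] := List.getLast?_eq_none_iff.mp hl
      subst this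
      simp [pvStep, hname]
    | some q =>
      simp [pvStep, hl, hname, hacc q hl]
  rw [List.foldl_cons, h1,
    pv_fold_run n es (fun e' he' => hn e' (List.mem_cons_of_mem _ he')) acc [e]]
  simp

-- folding the concatenation of nonempty blocks with strictly increasing names
theorem pv_fold_groups (ns : List String) (B : String → List (List (String × String)))
    (hs : ns.Pairwise (· < ·))
    (hB : ∀ n ∈ ns, ∀ e ∈ B n, pvName e = n)
    (hne : ∀ n ∈ ns, B n ≠ []) :
    ∀ (acc : List (String × List (List (String × String)))),
      (∀ q, acc.getLast? = some q → q.1 ∉ ns) →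
      (ns.flatMap B).foldl pvStep acc = acc ++ ns.map (fun n => (n, B n)) := by
  induction ns with
  | nil => intro acc _; simp
  | cons n rest ih =>
    intro acc hacc
    rcases List.pairwise_cons.mp hs with ⟨hn, hrest⟩
    simp only [List.flatMap_cons]
    rw [List.foldl_append]
    cases hBn : B n with
    | nil => exact absurd hBn (hne n List.mem_cons_self)
    | cons e es =>
      rw [pv_fold_block n e es (by rw [← hBn]; exact hB n List.mem_cons_self) acc
        (fun q hq => fun h => hacc q hq (h ▸ List.mem_cons_self))]
      rw [ih hrest (fun m hm => hB m (List.mem_cons_of_mem _ hm))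
        (fun m hm => hne m (List.mem_cons_of_mem _ hm))
        (acc ++ [(n, e :: es)]) ?hlast]
      case hlast =>
        intro q hq hmem
        rw [List.getLast?_concat] at hq
        cases hq
        exact absurd (hn _ hmem) (lt_irrefl n)
      simp [hBn]

-- ---- A's side: dict keys and buckets (as in the previous proof) ----

theorem pv_keys_eq (results : List (List (String × String))) :
    (results.foldl (fun d entry => d.modify (pvGetKey entry "test" "unknown") [] (fun v => v ++ [entry]))
      (PySem.Dict.empty : PySem.Dict String (List (List (String × String))))).keys
    = PySem.Set.ofList (results.map (fun entry => pvGetKey entry "test" "unknown")) := by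
  rw [PySem.Dict.keys_foldl_modify_key results (fun entry => pvGetKey entry "test" "unknown") []
        (fun _ entry => (fun v => v ++ [entry])) PySem.Dict.empty,
      PySem.Set.ofList_eq_foldl]
  rfl

theorem pv_bucket_eq (results : List (List (String × String))) (c : String) :
    (results.foldl (fun d entry => d.modify (pvGetKey entry "test" "unknown") [] (fun v => v ++ [entry]))
      (PySem.Dict.empty : PySem.Dict String (List (List (String × String))))).getD c []
    = results.filter (fun entry => pvGetKey entry "test" "unknown" == c) := by
  have h : results.foldl (fun d entry => d.modify (pvGetKey entry "test" "unknown") [] (fun v => v ++ [entry]))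
        (PySem.Dict.empty : PySem.Dict String (List (List (String × String))))
      = (results.map (fun entry => (pvGetKey entry "test" "unknown", entry))).foldl
          (fun d p => d.modify p.1 [] (fun v => v ++ [p.2])) PySem.Dict.empty := by
    rw [List.foldl_map]
  rw [h, PySem.Dict.getD_foldl_modify_append, List.filter_map, List.map_map]
  simp [Function.comp_def]

-- A in canonical form: sorted distinct names, each with its sorted filtered block
theorem pv_A_canonical (results : List (List (String × String))) :
    group_results_by_test_py results
      = (PySem.List.sorted (PySem.Set.ofList (results.map pvName)) (fun x => x) false).map
          (fun n => (n, PySem.List.sorted2 (results.filter (fun e => pvName e == n)) pvTar pvAdr false)) := by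
  unfold group_results_by_test_py
  rw [PySem.List.foldl_append_singleton_eq_map, List.nil_append, pv_keys_eq]
  apply List.map_congr_left
  intro name _
  rw [pv_bucket_eq]
  rfl

-- B in the same canonical form
theorem pv_B_canonical (results : List (List (String × String))) :
    group_results_by_test_py_alt results
      = (PySem.List.sorted (PySem.Set.ofList (results.map pvName)) (fun x => x) false).map
          (fun n => (n, PySem.List.sorted2 (results.filter (fun e => pvName e == n)) pvTar pvAdr false)) := by
  unfold group_results_by_test_py_alt
  change List.foldl pvStep []
    (PySem.List.sorted (PySem.List.sorted2 results pvTar pvAdr false) pvName false) = _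
  rw [pv_sorted_name_flatten]
  -- the distinct-name set of the sorted list is that of the input
  have hperm : ((PySem.List.sorted2 results pvTar pvAdr false).map pvName).Perm (results.map pvName) :=
    (PySem.List.sorted2_perm results pvTar pvAdr false).map pvName
  have hsetperm : (PySem.Set.ofList ((PySem.List.sorted2 results pvTar pvAdr false).map pvName)).Perm
      (PySem.Set.ofList (results.map pvName)) := by
    rw [List.perm_ext_iff_of_nodup (PySem.Set.nodup_ofList _) (PySem.Set.nodup_ofList _)]
    intro a
    rw [PySem.Set.mem_ofList, PySem.Set.mem_ofList]
    exact ⟨fun h => hperm.mem_iff.mp h, fun h => hperm.mem_iff.mpr h⟩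
  have hnames : PySem.List.sorted (PySem.Set.ofList ((PySem.List.sorted2 results pvTar pvAdr false).map pvName)) (fun x => x) false
      = PySem.List.sorted (PySem.Set.ofList (results.map pvName)) (fun x => x) false :=
    PySem.List.sorted_eq_sorted_of_perm _ _ _ (fun _ _ h => h) hsetperm
  rw [hnames]
  -- fold the grouping pass over the concatenated blocks
  rw [pv_fold_groups (PySem.List.sorted (PySem.Set.ofList (results.map pvName)) (fun x => x) false)
      (fun n => (PySem.List.sorted2 results pvTar pvAdr false).filter (fun e => pvName e == n))
      (PySem.List.sorted_ofList_pairwise_lt _)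
      (fun n _ e he => eq_of_beq ((List.mem_filter.mp he).2))
      ?hnonempty [] (fun q hq => by cases hq)]
  case hnonempty =>
    intro n hn
    have hn' : n ∈ results.map pvName :=
      (PySem.Set.mem_ofList _ _).mp ((PySem.List.mem_sorted _ _ _ _).mp hn)
    rcases List.mem_map.mp hn' with ⟨e, he, hne⟩
    have he' : e ∈ PySem.List.sorted2 results pvTar pvAdr false :=
      ((PySem.List.sorted2_perm results pvTar pvAdr false).mem_iff).mpr he
    have : e ∈ (PySem.List.sorted2 results pvTar pvAdr false).filter (fun e => pvName e == n) :=
      List.mem_filter.mpr ⟨he', by simp [hne]⟩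
    exact List.ne_nil_of_mem this
  rw [List.nil_append]
  apply List.map_congr_left
  intro n _
  -- filter commutes with the stable (target, address) sort
  rw [pv_sorted2_eq, pv_sorted2_eq,
    pv_sorted_filter (fun e => toLex (pvTar e, pvAdr e)) (fun e => pvName e == n) results]

-- ===== VERDICT (by name: the statement is the Claim_ definition above) =====
theorem group_results_by_test_py_spec : Claim_equal_group_results_by_test_py := by
  intro results _
  unfold Spec_group_results_by_test_py
  rw [pv_A_canonical, pv_B_canonical]
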